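-- pv_equiv track=rewrite | github.com/suhearsawho/AirBnB_clone | console.py | string_input
-- ===== SOURCE A (Python) =====
-- def string_input(raw_list):
--     """Create the final string input for setattr in do_update"""
--     raw = raw_list[3]
--     final = ''
--     raw_len = len(raw)
--     len_list = len(raw_list)
--     for i in range(raw_len):
--         if ((i != 0 or raw[i] not in ['"', "'"]) and
--                 (i != raw_len - 1 or raw[i] not in ['"', "'"])):
--             if raw[i] == "'":
--                 final += '\''
--             else:
--                 final += raw[i]
--     if raw[0] == '"' and raw[-1] != '"' and len_list > 4:
--         for raw_str in raw_list[4:]: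
--             final += ' '
--             for i in raw_str:
--                 if i != '"':
--                     final += i
--     return final
-- ===== SOURCE B (Python) =====
-- def string_input(raw_list):
--     """Create the final string input for setattr in do_update"""
--     raw = raw_list[3]
--     quotes = ('"', "'")
--     start = 1 if raw[0] in quotes else 0
--     end = len(raw) - 1 if raw[-1] in quotes else len(raw)
--     final = raw[start:end]
--     if raw[0] == '"' and raw[-1] != '"' and len(raw_list) > 4:
--         final += ' ' + ' '.join(w.replace('"', '') for w in raw_list[4:])
--     return final
-- ===== Notes on version B (the rewrite author's own statement) =====
-- stated objective: simpler
-- what changed: B computes the quote-trim with closed-form slice bounds (start/end indices) instead of A's per-character index loop with boundary tests, and builds the extra-words suffix with one join followed by one quote-filter instead of A's nested append loops.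
import Mathlib
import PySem

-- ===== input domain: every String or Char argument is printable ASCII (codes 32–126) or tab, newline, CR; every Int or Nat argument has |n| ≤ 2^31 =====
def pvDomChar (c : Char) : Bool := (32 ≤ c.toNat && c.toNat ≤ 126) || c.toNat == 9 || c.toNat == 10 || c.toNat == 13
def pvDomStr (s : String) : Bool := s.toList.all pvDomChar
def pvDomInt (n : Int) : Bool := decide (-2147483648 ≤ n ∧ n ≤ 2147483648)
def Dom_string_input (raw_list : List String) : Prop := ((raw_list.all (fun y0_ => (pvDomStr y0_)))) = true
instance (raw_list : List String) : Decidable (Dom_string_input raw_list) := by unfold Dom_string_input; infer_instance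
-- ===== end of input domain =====

-- B replaces A's per-character index loop by closed-form slice bounds and its nested
-- suffix loops by one join plus one filter (objective: simpler).


-- ===== PORT A =====
def string_input (raw_list : List String) : String :=
  let raw := PySem.List.pyGetD raw_list 3 ""        -- raw = raw_list[3]; IndexError (len < 4) excluded by Pre_
  let rawc := raw.toList
  let raw_len : Int := PySem.Str.len raw
  let len_list : Int := PySem.List.len raw_list
  let final : List Char :=
    (PySem.List.pyRange 0 raw_len 1).foldl (fun acc i =>
      let c := PySem.List.pyGetD rawc i ' '
      if ((i ≠ 0 ∨ (c ≠ '"' ∧ c ≠ '\'')) ∧ (i ≠ raw_len - 1 ∨ (c ≠ '"' ∧ c ≠ '\''))) then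
        (if c = '\'' then acc ++ ['\''] else acc ++ [c])
      else acc) []
  -- raw[0] raises IndexError when raw = "": excluded by Pre_
  let c0 := PySem.List.pyGetD rawc 0 ' '
  let clast := PySem.List.pyGetD rawc (-1) ' '
  let final :=
    if c0 = '"' ∧ clast ≠ '"' ∧ len_list > 4 then
      (PySem.List.slice raw_list (some 4) none).foldl (fun acc w =>
        (w.toList).foldl (fun acc2 c => if c ≠ '"' then acc2 ++ [c] else acc2) (acc ++ [' '])) final
    else final
  String.ofList final

-- ===== PORT B =====
def string_input_alt (raw_list : List String) : String :=
  let raw := PySem.List.pyGetD raw_list 3 ""        -- raw = raw_list[3]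
  let rawc := raw.toList
  let start : Int := if PySem.List.pyGetD rawc 0 ' ' = '"' ∨ PySem.List.pyGetD rawc 0 ' ' = '\'' then 1 else 0
  let stop : Int := if PySem.List.pyGetD rawc (-1) ' ' = '"' ∨ PySem.List.pyGetD rawc (-1) ' ' = '\'' then PySem.Str.len raw - 1 else PySem.Str.len raw
  let final := PySem.List.slice rawc (some start) (some stop)
  let final :=
    if PySem.List.pyGetD rawc 0 ' ' = '"' ∧ PySem.List.pyGetD rawc (-1) ' ' ≠ '"' ∧ PySem.List.len raw_list > 4 then
      let tail := PySem.Chars.join [' '] ((PySem.List.slice raw_list (some 4) none).map String.toList)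
      -- ''.join(c for c in tail if c != '"') ported as the filter it is
      final ++ (' ' :: tail.filter (fun c => c ≠ '"'))
    else final
  String.ofList final

-- ===== PRECONDITION & SPEC =====
-- Pre_ excludes exactly the inputs where A raises IndexError: lists shorter than 4, and
-- an empty 4th element (raw[0] is read unguarded).
def Pre_string_input (raw_list : List String) : Prop :=
  4 ≤ raw_list.length ∧ raw_list.getD 3 "" ≠ ""
instance (raw_list : List String) : Decidable (Pre_string_input raw_list) := by
  unfold Pre_string_input; infer_instance
def pvWitness_string_input : List String := ["update", "User", "123-45", "\"first name", "Betty\""]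

def Spec_string_input (raw_list : List String) (out : String) : Prop := out = string_input_alt raw_list
instance (raw_list : List String) (out : String) : Decidable (Spec_string_input raw_list out) := by
  unfold Spec_string_input; infer_instance

-- ===== CLAIM (what is proved, stated in full; the proofs are below) =====
def Claim_equal_string_input : Prop := ∀ (raw_list : List String), Dom_string_input raw_list → Pre_string_input raw_list → Spec_string_input raw_list (string_input raw_list)

-- ===== LEMMAS AND PROOFS =====

lemma filter_range_decide (s e n : Nat) :
    (List.range n).filter (fun k => decide (s ≤ k ∧ k < e)) = List.range' s (min e n - s) := by
  induction n with
  | zero => simp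
  | succ n ih =>
    rw [List.range_succ, List.filter_append, ih]
    by_cases h1 : s ≤ n ∧ n < e
    · have h2 : min e (n+1) - s = (min e n - s) + 1 := by omega
      have h3 : s + (min e n - s) = n := by omega
      rw [h2, List.range'_1_concat, h3]
      simp [h1]
    · have h2 : min e (n+1) - s = min e n - s := by omega
      simp [h1, h2]

lemma map_getD_range' {α : Type} (l : List α) (d : α) (s m : Nat) (h : s + m ≤ l.length) :
    (List.range' s m).map (fun k => l.getD k d) = (l.drop s).take m := by
  apply List.ext_getElem
  · simp; omega
  · intro i h1 h2
    have hi : i < m := by simpa using h1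
    have hsi : s + i < l.length := by omega
    simp [List.getElem_range', List.getElem?_eq_getElem hsi]

lemma cond_iff (l : List Char) (k : Nat) (hn : 1 ≤ l.length) (hk : k < l.length) :
    ((((k:Int) ≠ 0 ∨ (l.getD k ' ' ≠ '"' ∧ l.getD k ' ' ≠ '\'')) ∧ ((k:Int) ≠ (l.length:Int) - 1 ∨ (l.getD k ' ' ≠ '"' ∧ l.getD k ' ' ≠ '\'')))) ↔
    ((if l.getD 0 ' ' = '"' ∨ l.getD 0 ' ' = '\'' then 1 else 0) ≤ k ∧
      k < (if l.getD (l.length-1) ' ' = '"' ∨ l.getD (l.length-1) ' ' = '\'' then l.length - 1 else l.length)) := by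
  have e1 : ((k:Int) = 0) ↔ k = 0 := by omega
  have e2 : ((k:Int) = (l.length:Int) - 1) ↔ k = l.length - 1 := by omega
  simp only [Ne, e1, e2]
  by_cases q0 : l.getD 0 ' ' = '"' ∨ l.getD 0 ' ' = '\'' <;>
    by_cases ql : l.getD (l.length-1) ' ' = '"' ∨ l.getD (l.length-1) ' ' = '\'' <;>
    by_cases h0 : k = 0 <;> by_cases hl2 : k = l.length - 1 <;>
    simp_all <;> try omega
  all_goals tauto


lemma core_eq_list (l : List Char) (hl : l ≠ []) :
    ((PySem.List.pyRange 0 (l.length : Int) 1).foldl (fun acc i =>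
      if ((i ≠ 0 ∨ (PySem.List.pyGetD l i ' ' ≠ '"' ∧ PySem.List.pyGetD l i ' ' ≠ '\'')) ∧ (i ≠ (l.length : Int) - 1 ∨ (PySem.List.pyGetD l i ' ' ≠ '"' ∧ PySem.List.pyGetD l i ' ' ≠ '\''))) then
        (if PySem.List.pyGetD l i ' ' = '\'' then acc ++ ['\''] else acc ++ [PySem.List.pyGetD l i ' '])
      else acc) [])
    = PySem.List.slice l
        (some (if PySem.List.pyGetD l 0 ' ' = '"' ∨ PySem.List.pyGetD l 0 ' ' = '\'' then 1 else 0))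
        (some (if PySem.List.pyGetD l (-1) ' ' = '"' ∨ PySem.List.pyGetD l (-1) ' ' = '\'' then (l.length:Int) - 1 else (l.length:Int))) := by
  have hn : 1 ≤ l.length := List.length_pos_iff.mpr hl
  have hlast : PySem.List.pyGetD l (-1) ' ' = l.getD (l.length - 1) ' ' := by
    rw [PySem.List.pyGetD_neg_one l ' ' hl, List.getLast_eq_getElem, List.getD_eq_getElem l ' ' (by omega)]
  have h0 : PySem.List.pyGetD l 0 ' ' = l.getD 0 ' ' := by
    simp [PySem.List.pyGetD_zero]
  set s : Nat := if l.getD 0 ' ' = '"' ∨ l.getD 0 ' ' = '\'' then 1 else 0 with hs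
  set e : Nat := if l.getD (l.length-1) ' ' = '"' ∨ l.getD (l.length-1) ' ' = '\'' then l.length - 1 else l.length with he
  -- RHS
  have hrs : (if PySem.List.pyGetD l 0 ' ' = '"' ∨ PySem.List.pyGetD l 0 ' ' = '\'' then (1:Int) else 0) = (s:Int) := by
    rw [h0, hs]; split <;> simp
  have hre : (if PySem.List.pyGetD l (-1) ' ' = '"' ∨ PySem.List.pyGetD l (-1) ' ' = '\'' then (l.length:Int) - 1 else (l.length:Int)) = (e:Int) := by
    rw [hlast, he]; split <;> [skip; simp] ; push_cast [Nat.cast_sub hn]; ring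
  rw [hrs, hre, PySem.List.slice_natCast]
  -- LHS
  rw [PySem.List.pyRange_zero_natCast, List.foldl_map]
  rw [PySem.List.foldl_congr_mem _ _
      (fun acc k => if (fun k => decide (s ≤ k ∧ k < e)) k = true then acc ++ [(fun k => l.getD k ' ') k] else acc) _ ?_]
  · rw [PySem.List.foldl_append_if, filter_range_decide, map_getD_range']
    · have heN : e ≤ l.length := by rw [he]; split <;> omega
      have hme : min e l.length = e := by omega
      rw [hme, List.nil_append]
    · have heN : e ≤ l.length := by rw [he]; split <;> omega
      have hsN : s ≤ 1 := by rw [hs]; split <;> omega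
      omega
  · intro acc k hk
    simp only [List.mem_range] at hk
    have hcc : PySem.List.pyGetD l ((k:Nat):Int) ' ' = l.getD k ' ' := by simp
    simp only [hcc]
    have hiff := cond_iff l k hn hk
    rw [← hs, ← he] at hiff
    by_cases hc : (s ≤ k ∧ k < e)
    · have hq2 : decide (s ≤ k ∧ k < e) = true := by simp [hc]
      rw [if_pos (hiff.mpr hc), if_pos hq2]
      by_cases hq : l.getD k ' ' = '\'' <;> simp_all
    · have hq2 : ¬ (decide (s ≤ k ∧ k < e) = true) := by simp [hc]
      rw [if_neg (fun h => hc (hiff.mp h)), if_neg hq2]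

lemma core_eq (raw : String) (hl : raw.toList ≠ []) :
    ((PySem.List.pyRange 0 (PySem.Str.len raw) 1).foldl (fun acc i =>
      if ((i ≠ 0 ∨ (PySem.List.pyGetD raw.toList i ' ' ≠ '"' ∧ PySem.List.pyGetD raw.toList i ' ' ≠ '\'')) ∧ (i ≠ (PySem.Str.len raw) - 1 ∨ (PySem.List.pyGetD raw.toList i ' ' ≠ '"' ∧ PySem.List.pyGetD raw.toList i ' ' ≠ '\''))) then
        (if PySem.List.pyGetD raw.toList i ' ' = '\'' then acc ++ ['\''] else acc ++ [PySem.List.pyGetD raw.toList i ' '])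
      else acc) [])
    = PySem.List.slice raw.toList
        (some (if PySem.List.pyGetD raw.toList 0 ' ' = '"' ∨ PySem.List.pyGetD raw.toList 0 ' ' = '\'' then 1 else 0))
        (some (if PySem.List.pyGetD raw.toList (-1) ' ' = '"' ∨ PySem.List.pyGetD raw.toList (-1) ' ' = '\'' then PySem.Str.len raw - 1 else PySem.Str.len raw)) := by
  simp only [PySem.Str.len_eq]
  exact core_eq_list raw.toList hl

lemma suffix_join (p : Char → Bool) (hp : p ' ' = true) (rest : List String) : ∀ (w : String),
    ' ' :: (PySem.Chars.join [' '] ((w :: rest).map String.toList)).filter p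
      = (w :: rest).flatMap (fun u => ' ' :: u.toList.filter p) := by
  induction rest with
  | nil => intro w; simp [PySem.Chars.join_singleton]
  | cons w' rest' ih =>
    intro w
    rw [List.map_cons, List.map_cons, PySem.Chars.join_cons_cons, List.filter_append,
      List.filter_append]
    have := ih w'
    rw [List.map_cons] at this
    simp only [List.flatMap_cons] at this ⊢
    simp [hp] at this ⊢
    exact this


-- ===== VERDICT (by name: the statement is the Claim_ definition above) =====
theorem string_input_spec : Claim_equal_string_input := by
  intro raw_list _hdom hpre
  obtain ⟨hlen, hraw⟩ := hpre
  unfold Spec_string_input string_input string_input_alt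
  have hget : PySem.List.pyGetD raw_list 3 "" = raw_list.getD 3 "" :=
    PySem.List.pyGetD_ofNat' raw_list 3 ""
  set raw := PySem.List.pyGetD raw_list 3 "" with hrawdef
  have hne : raw ≠ "" := by rw [hget]; exact hraw
  have hl : raw.toList ≠ [] := by simp [hne]
  simp only []
  rw [core_eq raw hl]
  by_cases hc : PySem.List.pyGetD raw.toList 0 ' ' = '"' ∧ PySem.List.pyGetD raw.toList (-1) ' ' ≠ '"' ∧ PySem.List.len raw_list > 4
  · rw [if_pos hc, if_pos hc]
    congr 1
    -- suffix part
    have hws : PySem.List.slice raw_list (some 4) none = raw_list.drop 4 := by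
      rw [PySem.List.slice_from raw_list (by norm_num)]; rfl
    have hlen4 : 4 < raw_list.length := by
      have := hc.2.2
      simpa [PySem.List.len_eq] using this
    obtain ⟨w, rest, hwr⟩ := List.exists_cons_of_ne_nil (l := raw_list.drop 4)
      (by intro h; have := List.drop_eq_nil_iff.mp h; omega)
    rw [hws, hwr]
    -- A side: inner char loop = filter, outer = flatMap
    rw [PySem.List.foldl_congr_mem _ _
        (fun acc u => acc ++ (' ' :: u.toList.filter (fun c => decide (c ≠ '"')))) _ ?_]
    · rw [PySem.List.foldl_append_eq_flatMap]
      rw [suffix_join (fun c => decide (c ≠ '"')) (by decide) rest w]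
    · intro acc u _
      rw [PySem.List.foldl_append_ite_eq_filter]
      simp
  · rw [if_neg hc, if_neg hc]
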